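-- pv_equiv track=rewrite | github.com/miliar/Code_Jam_Webscraper | Solutions_python/Problem_43/104.py | solve
-- ===== SOURCE A (Python) =====
-- def solve(s):
--     s_set = set([x for x in s])
--     base = len(s_set)
--     if base == 1:
--         base = 2
--
--     _map = dict()
--     _map[s[0]]=1
--     trans = [1]
--     t = 0
--     for x in s[1:]:
--         if x in _map:
--             trans.append(_map[x])
--         else:
--             _map[x]=t
--             trans.append(t)
--             t=t+1
--             if t==1:
--                 t=2
--     trans.reverse()
--     ans = 0
--     for i in range(len(trans)):
--         ans = ans + base**i*trans[i]
--     return ans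
-- ===== SOURCE B (Python) =====
-- def solve(s):
--     # Horner's method: one pass with a running accumulator instead of computing base**i per digit
--     base = max(len(set(s)), 2)
--     digits = {}
--     nxt = 0
--     ans = 0
--     for x in s:
--         if x not in digits:
--             if not digits:
--                 d = 1
--             else:
--                 d = nxt
--                 nxt = 2 if nxt == 0 else nxt + 1
--             digits[x] = d
--         ans = ans * base + digits[x]
--     return ans
-- ===== Notes on version B (the rewrite author's own statement) =====
-- stated objective: faster
-- what changed: Replaces A's two-phase scheme (build digit list, reverse it, then sum base**i * digit computing a fresh power per position) with a single Horner pass ans = ans*base + digit over the string.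
import Mathlib
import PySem

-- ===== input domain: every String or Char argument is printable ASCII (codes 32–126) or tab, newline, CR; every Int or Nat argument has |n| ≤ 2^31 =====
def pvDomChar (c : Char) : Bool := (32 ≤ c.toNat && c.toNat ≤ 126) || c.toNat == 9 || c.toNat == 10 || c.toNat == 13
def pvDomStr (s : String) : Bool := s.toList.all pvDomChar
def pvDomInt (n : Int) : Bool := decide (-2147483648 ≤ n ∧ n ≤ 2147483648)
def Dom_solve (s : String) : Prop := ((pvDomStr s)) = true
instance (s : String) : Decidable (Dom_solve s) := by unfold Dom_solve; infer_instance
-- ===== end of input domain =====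

-- B replaces A's positional sum with per-digit powers (ans += base**i * digit) by a single
-- Horner pass (ans = ans*base + digit), assigning digits in the same one-pass scheme.


-- ===== PORT A =====
-- body of A's loop 'for x in s[1:]': state (_map, t, trans)
def aStep (st : PySem.Dict Char Int × Int × List Int) (x : Char) :
    PySem.Dict Char Int × Int × List Int :=
  match st with
  | (m, t, tr) =>
    match PySem.Dict.get? m x with
    | some v => (m, t, tr ++ [v])
    | none =>
        let m' := m.insert x t
        let tr' := tr ++ [t]
        let t' := t + 1
        (m', if t' = 1 then 2 else t', tr')

def solve (s : String) : Int :=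
  let base0 : Int := ((PySem.Set.ofList s.toList).length : Int)
  let base : Int := if base0 = 1 then 2 else base0
  match s.toList with
  | [] => 0   -- Python raises IndexError at s[0]; excluded by Pre_solve
  | c :: rest =>
      let st := rest.foldl aStep ((PySem.Dict.empty : PySem.Dict Char Int).insert c 1, 0, [1])
      let trans := st.2.2.reverse
      (List.range trans.length).foldl (fun ans i => ans + base ^ i * trans.getD i 0) 0

-- ===== PORT B =====
-- body of B's loop 'for x in s': state (digits, nxt, ans)
def bStep (base : Int) (st : PySem.Dict Char Int × Int × Int) (x : Char) :
    PySem.Dict Char Int × Int × Int :=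
  match st with
  | (dg, nxt, ans) =>
    match PySem.Dict.get? dg x with
    | some d => (dg, nxt, ans * base + d)
    | none =>
        if dg.size = 0 then (dg.insert x 1, nxt, ans * base + 1)
        else (dg.insert x nxt, if nxt = 0 then 2 else nxt + 1, ans * base + nxt)

def solve_alt (s : String) : Int :=
  let base : Int := max ((PySem.Set.ofList s.toList).length : Int) 2
  (s.toList.foldl (bStep base) ((PySem.Dict.empty : PySem.Dict Char Int), 0, 0)).2.2

-- ===== PRECONDITION & SPEC =====
-- A evaluates s[0] and raises IndexError on the empty string; everything else is admitted.
def Pre_solve (s : String) : Prop := s.toList ≠ []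
instance (s : String) : Decidable (Pre_solve s) := by unfold Pre_solve; infer_instance
def pvWitness_solve : String := "ab"

def Spec_solve (s : String) (out : Int) : Prop := out = solve_alt s
instance (s : String) (out : Int) : Decidable (Spec_solve s out) := by unfold Spec_solve; infer_instance

-- ===== CLAIM (what is proved, stated in full; the proofs are below) =====
def Claim_equal_solve : Prop := ∀ (s : String), Dom_solve s → Pre_solve s → Spec_solve s (solve s)

-- ===== LEMMAS AND PROOFS =====

/-- Horner evaluation, B's accumulator. -/
def horner (base : Int) (l : List Int) : Int := l.foldl (fun a d => a * base + d) 0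

theorem horner_append_singleton (base : Int) (l : List Int) (d : Int) :
    horner base (l ++ [d]) = horner base l * base + d := by
  simp [horner, List.foldl_append]

theorem foldl_horner_init (base : Int) : ∀ (l : List Int) (a : Int),
    l.foldl (fun x d => x * base + d) a = a * base ^ l.length + horner base l := by
  intro l
  induction l with
  | nil => intro a; simp [horner]
  | cons d l ih =>
      intro a
      rw [List.foldl_cons, ih, List.length_cons]
      have hh : horner base (d :: l) = l.foldl (fun x e => x * base + e) (0 * base + d) := rfl
      rw [hh, ih]
      ring

theorem foldl_range_add (f : ℕ → Int) : ∀ (n : ℕ) (c : Int),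
    (List.range n).foldl (fun a i => a + f i) c = c + ∑ i ∈ Finset.range n, f i := by
  intro n
  induction n with
  | zero => intro c; simp
  | succ n ih =>
      intro c
      rw [List.range_succ, List.foldl_append, ih, Finset.sum_range_succ]
      simp [add_assoc]

/-- A's final loop over the reversed digit list is Horner on the original list. -/
theorem range_sum_eq_horner (base : Int) (tr : List Int) :
    (List.range tr.length).foldl (fun ans i => ans + base ^ i * tr.getD i 0) 0
      = horner base tr.reverse := by
  induction tr using List.reverseRecOn with
  | nil => simp [horner]
  | append_singleton ys d ih =>
      rw [foldl_range_add] at ih ⊢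
      have hlen : (ys ++ [d]).length = ys.length + 1 := by simp
      rw [hlen, Finset.sum_range_succ]
      have hlast : (ys ++ [d]).getD ys.length 0 = d := by
        simp [List.getD]
      have hsum : ∑ i ∈ Finset.range ys.length, base ^ i * (ys ++ [d]).getD i 0
          = ∑ i ∈ Finset.range ys.length, base ^ i * ys.getD i 0 := by
        apply Finset.sum_congr rfl
        intro i hi
        have hi' : i < ys.length := Finset.mem_range.mp hi
        simp [List.getD, List.getElem?_append_left hi']
      rw [hlast, hsum]
      have : (ys ++ [d]).reverse = d :: ys.reverse := by simp
      rw [this]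
      have : horner base (d :: ys.reverse)
          = ys.reverse.foldl (fun x e => x * base + e) (0 * base + d) := rfl
      rw [this, foldl_horner_init, ← ih]
      simp only [List.length_reverse]
      ring

theorem size_insert_pos (m : PySem.Dict Char Int) (x : Char) (v : Int)
    (h : 0 < m.size) : 0 < (m.insert x v).size := by
  by_cases hc : m.contains x
  · rw [PySem.Dict.size_insert]; simp [hc, h]
  · rw [PySem.Dict.size_insert]; simp [hc]

/-- The two loops run in lockstep: same dict, same next-digit counter, and B's
    accumulator is the Horner value of A's digit list. -/
theorem loop_corr (base : Int) : ∀ (xs : List Char) (m : PySem.Dict Char Int) (t : Int)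
    (tr : List Int), 0 < m.size →
    xs.foldl (bStep base) (m, t, horner base tr)
      = ((xs.foldl aStep (m, t, tr)).1, (xs.foldl aStep (m, t, tr)).2.1,
          horner base (xs.foldl aStep (m, t, tr)).2.2) := by
  intro xs
  induction xs with
  | nil => intro m t tr _; rfl
  | cons x xs ih =>
      intro m t tr hm
      simp only [List.foldl_cons]
      cases hx : PySem.Dict.get? m x with
      | some v =>
          have ha : aStep (m, t, tr) x = (m, t, tr ++ [v]) := by
            simp [aStep, hx]
          have hb : bStep base (m, t, horner base tr) x
              = (m, t, horner base tr * base + v) := by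
            simp [bStep, hx]
          rw [ha, hb, ← horner_append_singleton, ih _ _ _ hm]
      | none =>
          have ha : aStep (m, t, tr) x
              = (m.insert x t, if t + 1 = 1 then 2 else t + 1, tr ++ [t]) := by
            simp [aStep, hx]
          have hb : bStep base (m, t, horner base tr) x
              = (m.insert x t, if t = 0 then 2 else t + 1, horner base tr * base + t) := by
            have hsz : ¬ m.size = 0 := by omega
            simp [bStep, hx, hsz]
          have hif : (if t + 1 = 1 then (2 : Int) else t + 1)
              = (if t = 0 then 2 else t + 1) := by
            by_cases h0 : t = 0 <;> simp [h0]
          rw [ha, hb, hif, ← horner_append_singleton,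
            ih _ _ _ (size_insert_pos m x t hm)]

theorem set_len_pos (c : Char) (rest : List Char) :
    0 < (PySem.Set.ofList (c :: rest)).length := by
  have : c ∈ PySem.Set.ofList (c :: rest) := by
    rw [PySem.Set.mem_ofList]; exact List.mem_cons_self
  exact List.length_pos_of_mem this

-- ===== VERDICT (by name: the statement is the Claim_ definition above) =====
theorem solve_spec : Claim_equal_solve := by
  intro s _ hpre
  unfold Spec_solve solve solve_alt
  cases hs : s.toList with
  | nil => exact absurd hs hpre
  | cons c rest =>
      dsimp only
      have hpos : 0 < (PySem.Set.ofList (c :: rest)).length := set_len_pos c rest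
      -- the two bases agree
      have hbase : (if ((PySem.Set.ofList (c :: rest)).length : Int) = 1 then (2 : Int)
            else ((PySem.Set.ofList (c :: rest)).length : Int))
          = max ((PySem.Set.ofList (c :: rest)).length : Int) 2 := by
        have h1 : (1 : Int) ≤ ((PySem.Set.ofList (c :: rest)).length : Int) := by
          exact_mod_cast hpos
        split_ifs with h <;> omega
      set base : Int := max ((PySem.Set.ofList (c :: rest)).length : Int) 2 with hbdef
      rw [hbase]
      -- B's first step matches A's initialisation
      have hfirst : bStep base ((PySem.Dict.empty : PySem.Dict Char Int), 0, 0) c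
          = ((PySem.Dict.empty : PySem.Dict Char Int).insert c 1, 0, horner base [1]) := by
        simp [bStep, PySem.Dict.get?_empty, horner]
      rw [List.foldl_cons, hfirst,
        loop_corr base rest _ 0 [1] (by simp [PySem.Dict.size_insert])]
      rw [range_sum_eq_horner, List.reverse_reverse]
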